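-- pv_equiv track=rewrite | github.com/vincbct34/Tek2-EPITECH | Mathematics/gameofstones/src/plots.py | eliminate_enemies_with_close_allies
-- ===== SOURCE A (Python) =====
-- from collections import deque
--
-- def bfs_best_conspirator(enemy, conspiracies, close_allies, distances, index_map):
--
--     """Use BFS to find the best conspirator against a given enemy.
--
--     Args:
--         enemy (str): Name of the enemy.
--         conspiracies (dict): Dictionary of conspiracies.
--         close_allies (set): Set of close allies.
--         distances (list): Floyd-Warshall distances.
--         index_map (dict): Dictionary mapping names to indices.
--
--     Returns:
--         str: The name of the best conspirator.
--     """
--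
--     queue = deque()
--     visited = set()
--
--     for ally in close_allies:
--         if enemy in conspiracies.get(ally, []):
--             queue.append((ally, distances[index_map["Cersei Lannister"]][index_map[ally]]))
--             visited.add(ally)
--
--     best_conspirator = None
--     while queue:
--         conspirator, distance = queue.popleft()
--
--         if not best_conspirator or (
--             conspirator not in conspiracies.get("Cersei Lannister", []) and best_conspirator in conspiracies.get("Cersei Lannister", [])
--         ) or (
--             distance < distances[index_map["Cersei Lannister"]][index_map[best_conspirator]]
--         ) or (
--             distance == distances[index_map["Cersei Lannister"]][index_map[best_conspirator]] and conspirator < best_conspirator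
--         ):
--             best_conspirator = conspirator
--
--     return best_conspirator
--
-- def eliminate_enemies_with_close_allies(enemies, conspiracies, close_allies, distances, index_map):
--
--     """Optimized elimination of direct enemies using BFS to find best conspirators.
--
--     Args:
--         enemies (set): Set of enemies.
--         conspiracies (dict): Dictionary of conspiracies.
--         close_allies (set): Set of close allies.
--         distances (list): Floyd-Warshall distances.
--         index_map (dict): Dictionary mapping names to indices.
--
--     Returns:
--         tuple: A tuple containing the direct conspiracies and the remaining enemies.
--     """
--
--     direct_conspiracies = []
--     remaining_enemies = set()
--
--     for enemy in enemies:
--         best_conspirator = bfs_best_conspirator(enemy, conspiracies, close_allies, distances, index_map)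
--
--         if best_conspirator:
--             direct_conspiracies.append([best_conspirator, enemy])
--         else:
--             remaining_enemies.add(enemy)
--
--     direct_conspiracies.sort()
--     return direct_conspiracies, remaining_enemies
-- ===== SOURCE B (Python) =====
-- def eliminate_enemies_with_close_allies(enemies, conspiracies, close_allies, distances, index_map):
--     """Single inverted pass over the allies' conspiracy lists, keeping the best
--     (conspirator, distance) per enemy in a dict, instead of re-scanning every
--     ally list for every enemy."""
--     enemy_set = set(enemies)
--     cersei_group = conspiracies.get("Cersei Lannister", [])
--     best = {}  # enemy -> (conspirator, its distance to Cersei)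
--     for ally in close_allies:
--         targets = [t for t in dict.fromkeys(conspiracies.get(ally, [])) if t in enemy_set]
--         if not targets:
--             continue
--         dist = distances[index_map["Cersei Lannister"]][index_map[ally]]
--         for t in targets:
--             cur = best.get(t)
--             if cur is None:
--                 best[t] = (ally, dist)
--             else:
--                 b, bd = cur
--                 if (not b) or (ally not in cersei_group and b in cersei_group) \
--                         or dist < bd or (dist == bd and ally < b):
--                     best[t] = (ally, dist)
--     direct = sorted([b, e] for e, (b, _) in best.items() if b)
--     remaining = {e for e in enemies if not (best.get(e) and best[e][0])}
--     return direct, remaining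
-- ===== Notes on version B (the rewrite author's own statement) =====
-- stated objective: faster
-- what changed: A runs a per-enemy scan over every close ally's conspiracy list (membership test per enemy-ally pair); B makes one inverted pass over the allies' conspiracy lists, updating a best-conspirator dict per enemy, then sorts the collected pairs.
-- outside the precondition, e.g. on eliminate_enemies_with_close_allies({'a'}, {'x': ['a']}, {'x'}, [[0]], {}): A raises KeyError, B raises KeyError
import Mathlib
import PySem

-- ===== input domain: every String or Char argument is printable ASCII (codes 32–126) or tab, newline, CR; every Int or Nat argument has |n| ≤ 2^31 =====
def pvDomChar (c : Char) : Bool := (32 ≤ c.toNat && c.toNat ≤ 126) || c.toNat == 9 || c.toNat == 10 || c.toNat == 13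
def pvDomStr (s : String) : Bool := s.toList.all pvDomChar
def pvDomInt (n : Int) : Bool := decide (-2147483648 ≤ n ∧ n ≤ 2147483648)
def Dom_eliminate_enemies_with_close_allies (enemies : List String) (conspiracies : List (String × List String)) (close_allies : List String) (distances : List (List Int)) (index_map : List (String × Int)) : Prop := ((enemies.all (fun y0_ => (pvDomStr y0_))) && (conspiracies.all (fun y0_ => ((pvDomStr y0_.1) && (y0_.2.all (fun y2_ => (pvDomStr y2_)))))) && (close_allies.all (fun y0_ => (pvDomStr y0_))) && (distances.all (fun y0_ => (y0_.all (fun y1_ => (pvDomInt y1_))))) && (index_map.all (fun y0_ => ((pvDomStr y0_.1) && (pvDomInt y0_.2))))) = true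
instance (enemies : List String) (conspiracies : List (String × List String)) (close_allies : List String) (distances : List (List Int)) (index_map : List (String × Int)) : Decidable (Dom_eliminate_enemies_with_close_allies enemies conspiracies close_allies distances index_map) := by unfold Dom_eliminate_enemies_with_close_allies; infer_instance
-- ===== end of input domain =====

-- B replaces A's per-enemy rescans of every ally's conspiracy list by one inverted pass over
-- the allies' lists that keeps the best (conspirator, distance) per enemy in a dict: faster.


-- ===== PORT A =====
-- distances[index_map["Cersei Lannister"]][index_map[x]]  (total form; Pre_ guarantees the lookups succeed)
def pvDistOf (distances : List (List Int)) (idxD : PySem.Dict String Int) (x : String) : Int :=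
  PySem.List.pyGetD (PySem.List.pyGetD distances ((idxD.get? "Cersei Lannister").getD 0) [])
    ((idxD.get? x).getD 0) 0

-- body of A's `while queue:` loop (Python's `not best_conspirator` is true for None and for "")
def pvBfsStep (cG : List String) (distances : List (List Int)) (idxD : PySem.Dict String Int)
    (best : Option String) (p : String × Int) : Option String :=
  match best with
  | none => some p.1
  | some b =>
    if b = "" ∨ (p.1 ∉ cG ∧ b ∈ cG) ∨ p.2 < pvDistOf distances idxD b ∨
        (p.2 = pvDistOf distances idxD b ∧ p.1 < b) then some p.1 else some b

def pvBfs (enemy : String) (conspD : PySem.Dict String (List String)) (close_allies : List String)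
    (distances : List (List Int)) (idxD : PySem.Dict String Int) : Option String :=
  let qv : List (String × Int) × PySem.Set String := close_allies.foldl (fun s a =>
    if enemy ∈ conspD.getD a [] then
      (s.1 ++ [(a, pvDistOf distances idxD a)], PySem.Set.add s.2 a)
    else s) ([], PySem.Set.empty)
  qv.1.foldl (pvBfsStep (conspD.getD "Cersei Lannister" []) distances idxD) none

def eliminate_enemies_with_close_allies (enemies : List String) (conspiracies : List (String × List String)) (close_allies : List String) (distances : List (List Int)) (index_map : List (String × Int)) : List (List String) × List String :=
  let conspD := PySem.Dict.ofList conspiracies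
  let idxD := PySem.Dict.ofList index_map
  let dr : List (List String) × PySem.Set String := enemies.foldl (fun s e =>
    match pvBfs e conspD close_allies distances idxD with
    | some b => if b ≠ "" then (s.1 ++ [[b, e]], s.2) else (s.1, PySem.Set.add s.2 e)
    | none => (s.1, PySem.Set.add s.2 e)) ([], PySem.Set.empty)
  (PySem.List.sorted dr.1 (fun x => x) false, dr.2)

-- ===== PORT B =====
-- the distinct conspiracy targets of ally a that are enemies
def pvTs (conspD : PySem.Dict String (List String)) (enemySet : PySem.Set String) (a : String) : List String :=
  (PySem.List.dedup (conspD.getD a [])).filter (fun t => enemySet.contains t)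

-- body of B's inner `for t in targets:` loop
def pvUpd (cG : List String) (a : String) (dist : Int)
    (d : PySem.Dict String (String × Int)) (t : String) : PySem.Dict String (String × Int) :=
  match d.get? t with
  | none => d.insert t (a, dist)
  | some (b, bd) =>
    if b = "" ∨ (a ∉ cG ∧ b ∈ cG) ∨ dist < bd ∨ (dist = bd ∧ a < b) then d.insert t (a, dist) else d

-- body of B's outer `for ally in close_allies:` loop
def pvAllyStep (conspD : PySem.Dict String (List String)) (enemySet : PySem.Set String)
    (cG : List String) (distances : List (List Int)) (idxD : PySem.Dict String Int)
    (d : PySem.Dict String (String × Int)) (a : String) : PySem.Dict String (String × Int) :=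
  let targets := pvTs conspD enemySet a
  if targets = [] then d
  else targets.foldl (pvUpd cG a (pvDistOf distances idxD a)) d

def eliminate_enemies_with_close_allies_alt (enemies : List String) (conspiracies : List (String × List String)) (close_allies : List String) (distances : List (List Int)) (index_map : List (String × Int)) : List (List String) × List String :=
  let conspD := PySem.Dict.ofList conspiracies
  let idxD := PySem.Dict.ofList index_map
  let enemySet := PySem.Set.ofList enemies
  let cG := conspD.getD "Cersei Lannister" []
  let best := close_allies.foldl (pvAllyStep conspD enemySet cG distances idxD) PySem.Dict.empty
  let direct := PySem.List.sorted
    ((best.items.filter (fun p => p.2.1 ≠ "")).map (fun p => [p.2.1, p.1])) (fun x => x) false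
  let remaining := PySem.Set.ofList (enemies.filter (fun e =>
    match best.get? e with | some q => q.1 = "" | none => true))
  (direct, remaining)

-- ===== PRECONDITION & SPEC =====
-- Pre_ excludes exactly (i) inputs whose `enemies` list has duplicates (it models a Python set,
-- which cannot) and (ii) inputs where A raises KeyError/IndexError because "Cersei Lannister" or a
-- conspiring close ally is missing from index_map, or an index falls outside the distances matrix.
def Pre_eliminate_enemies_with_close_allies (enemies : List String) (conspiracies : List (String × List String)) (close_allies : List String) (distances : List (List Int)) (index_map : List (String × Int)) : Prop :=
  enemies.Nodup ∧
  (∀ a ∈ close_allies,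
    (∃ e ∈ enemies, e ∈ (PySem.Dict.ofList conspiracies).getD a []) →
      (((PySem.Dict.ofList index_map).contains "Cersei Lannister" = true) ∧
       PySem.Raise.InRange distances.length
         (((PySem.Dict.ofList index_map).get? "Cersei Lannister").getD 0) ∧
       ((PySem.Dict.ofList index_map).contains a = true) ∧
       PySem.Raise.InRange
         (PySem.List.pyGetD distances (((PySem.Dict.ofList index_map).get? "Cersei Lannister").getD 0) []).length
         (((PySem.Dict.ofList index_map).get? a).getD 0)))
instance (enemies : List String) (conspiracies : List (String × List String)) (close_allies : List String) (distances : List (List Int)) (index_map : List (String × Int)) : Decidable (Pre_eliminate_enemies_with_close_allies enemies conspiracies close_allies distances index_map) := by unfold Pre_eliminate_enemies_with_close_allies; infer_instance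

def pvWitness_eliminate_enemies_with_close_allies : List String × (List (String × List String)) × List String × List (List Int) × (List (String × Int)) :=
  (["a", "b"], [("x", ["a"]), ("y", ["a", "c"])], ["x", "y"], [[0, 1, 2], [3, 4, 5], [6, 7, 8]],
   [("Cersei Lannister", 0), ("x", 1), ("y", 2)])

def Spec_eliminate_enemies_with_close_allies (enemies : List String) (conspiracies : List (String × List String)) (close_allies : List String) (distances : List (List Int)) (index_map : List (String × Int)) (out : List (List String) × List String) : Prop := out = eliminate_enemies_with_close_allies_alt enemies conspiracies close_allies distances index_map
instance (enemies : List String) (conspiracies : List (String × List String)) (close_allies : List String) (distances : List (List Int)) (index_map : List (String × Int)) (out : List (List String) × List String) : Decidable (Spec_eliminate_enemies_with_close_allies enemies conspiracies close_allies distances index_map out) := by unfold Spec_eliminate_enemies_with_close_allies; infer_instance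

-- ===== CLAIM (what is proved, stated in full; the proofs are below) =====
def Claim_equal_eliminate_enemies_with_close_allies : Prop := ∀ (enemies : List String) (conspiracies : List (String × List String)) (close_allies : List String) (distances : List (List Int)) (index_map : List (String × Int)), Dom_eliminate_enemies_with_close_allies enemies conspiracies close_allies distances index_map → Pre_eliminate_enemies_with_close_allies enemies conspiracies close_allies distances index_map → Spec_eliminate_enemies_with_close_allies enemies conspiracies close_allies distances index_map (eliminate_enemies_with_close_allies enemies conspiracies close_allies distances index_map)

-- ===== LEMMAS AND PROOFS =====

-- B's per-candidate update of a single dict entry, as a function on Option (name, distance)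
def pvStepB (cG : List String) (a : String) (dist : Int) :
    Option (String × Int) → Option (String × Int)
  | none => some (a, dist)
  | some (b, bd) =>
    if b = "" ∨ (a ∉ cG ∧ b ∈ cG) ∨ dist < bd ∨ (dist = bd ∧ a < b) then some (a, dist) else some (b, bd)

theorem pvUpd_get?_self (cG : List String) (a : String) (dist : Int)
    (d : PySem.Dict String (String × Int)) (t : String) :
    (pvUpd cG a dist d t).get? t = pvStepB cG a dist (d.get? t) := by
  unfold pvUpd pvStepB
  rcases h : d.get? t with _ | ⟨b, bd⟩ <;> simp only [h]
  · simp [PySem.Dict.get?_insert_self]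
  · split_ifs with hc
    · simp [PySem.Dict.get?_insert_self]
    · simp [h]

theorem pvUpd_get?_ne (cG : List String) (a : String) (dist : Int)
    (d : PySem.Dict String (String × Int)) (t e : String) (h : e ≠ t) :
    (pvUpd cG a dist d t).get? e = d.get? e := by
  unfold pvUpd
  rcases hg : d.get? t with _ | ⟨b, bd⟩ <;> simp only [hg]
  · simp [PySem.Dict.get?_insert_of_ne _ _ h]
  · split_ifs with hc
    · simp [PySem.Dict.get?_insert_of_ne _ _ h]
    · rfl

theorem foldl_pvUpd_not_mem (cG : List String) (a : String) (dist : Int)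
    (ts : List String) (d : PySem.Dict String (String × Int)) (e : String) (he : e ∉ ts) :
    (ts.foldl (pvUpd cG a dist) d).get? e = d.get? e := by
  induction ts generalizing d with
  | nil => rfl
  | cons t ts ih =>
    simp only [List.foldl_cons]
    rw [ih _ (fun h => he (List.mem_cons_of_mem _ h)),
      pvUpd_get?_ne _ _ _ _ _ _ (fun h => he (by simp [h]))]

theorem foldl_pvUpd_get? (cG : List String) (a : String) (dist : Int)
    (ts : List String) (d : PySem.Dict String (String × Int)) (e : String) (hnd : ts.Nodup) :
    (ts.foldl (pvUpd cG a dist) d).get? e =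
      if e ∈ ts then pvStepB cG a dist (d.get? e) else d.get? e := by
  induction ts generalizing d with
  | nil => simp
  | cons t ts ih =>
    simp only [List.foldl_cons]
    rcases List.nodup_cons.mp hnd with ⟨ht, hts⟩
    by_cases he : e = t
    · subst he
      rw [foldl_pvUpd_not_mem _ _ _ _ _ _ ht, pvUpd_get?_self]
      simp
    · rw [ih _ hts, pvUpd_get?_ne _ _ _ _ _ _ he]
      simp [List.mem_cons, he]

theorem nodup_pvTs (conspD : PySem.Dict String (List String)) (enemySet : PySem.Set String)
    (a : String) : (pvTs conspD enemySet a).Nodup :=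
  (PySem.List.nodup_dedup _).filter _

theorem mem_pvTs (conspD : PySem.Dict String (List String)) (enemies : List String)
    (a e : String) :
    e ∈ pvTs conspD (PySem.Set.ofList enemies) a ↔ e ∈ conspD.getD a [] ∧ e ∈ enemies := by
  simp [pvTs, PySem.Set.mem_ofList, and_comm]

theorem pvAllyStep_get? (conspD : PySem.Dict String (List String)) (enemySet : PySem.Set String)
    (cG : List String) (distances : List (List Int)) (idxD : PySem.Dict String Int)
    (d : PySem.Dict String (String × Int)) (a e : String) :
    (pvAllyStep conspD enemySet cG distances idxD d a).get? e =
      if e ∈ pvTs conspD enemySet a then pvStepB cG a (pvDistOf distances idxD a) (d.get? e)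
      else d.get? e := by
  simp only [pvAllyStep]
  by_cases h0 : pvTs conspD enemySet a = []
  · simp [h0]
  · rw [if_neg h0, foldl_pvUpd_get? _ _ _ _ _ _ (nodup_pvTs _ _ _)]

-- the inverted pass, read per enemy: a fold of pvStepB over that enemy's candidate list
theorem foldl_pvAllyStep_get? (conspD : PySem.Dict String (List String)) (enemySet : PySem.Set String)
    (cG : List String) (distances : List (List Int)) (idxD : PySem.Dict String Int)
    (L : List String) (d : PySem.Dict String (String × Int)) (e : String) :
    (L.foldl (pvAllyStep conspD enemySet cG distances idxD) d).get? e =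
      ((L.filter (fun a => e ∈ pvTs conspD enemySet a)).map
          (fun a => (a, pvDistOf distances idxD a))).foldl
        (fun o p => pvStepB cG p.1 p.2 o) (d.get? e) := by
  induction L generalizing d with
  | nil => rfl
  | cons a L ih =>
    simp only [List.foldl_cons, List.filter_cons]
    by_cases ha : e ∈ pvTs conspD enemySet a
    · rw [ih, pvAllyStep_get?, if_pos ha]; simp [ha]
    · rw [ih, pvAllyStep_get?, if_neg ha]; simp [ha]

-- B's fold tracks A's fold: the stored distance is always pvDistOf of the stored name
theorem foldl_pvStepB_map (cG : List String) (distances : List (List Int))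
    (idxD : PySem.Dict String Int) (Q : List (String × Int))
    (h : ∀ p ∈ Q, p.2 = pvDistOf distances idxD p.1) (o : Option String) :
    Q.foldl (fun o p => pvStepB cG p.1 p.2 o) (o.map (fun b => (b, pvDistOf distances idxD b))) =
      (Q.foldl (pvBfsStep cG distances idxD) o).map (fun b => (b, pvDistOf distances idxD b)) := by
  induction Q generalizing o with
  | nil => rfl
  | cons p Q ih =>
    simp only [List.foldl_cons]
    have hp := h p (List.mem_cons_self ..)
    have hQ : ∀ q ∈ Q, q.2 = pvDistOf distances idxD q.1 :=
      fun q hq => h q (List.mem_cons_of_mem _ hq)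
    rw [← ih hQ]
    congr 1
    rcases o with _ | b
    · simp [pvStepB, pvBfsStep, hp]
    · simp only [pvStepB, pvBfsStep, Option.map_some]
      split_ifs <;> simp [hp]

-- A's queue is the filtered-and-decorated ally list
theorem pvBfs_eq (enemy : String) (conspD : PySem.Dict String (List String))
    (close_allies : List String) (distances : List (List Int)) (idxD : PySem.Dict String Int) :
    pvBfs enemy conspD close_allies distances idxD =
      ((close_allies.filter (fun a => enemy ∈ conspD.getD a [])).map
          (fun a => (a, pvDistOf distances idxD a))).foldl
        (pvBfsStep (conspD.getD "Cersei Lannister" []) distances idxD) none := by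
  simp only [pvBfs]
  have hstep : ∀ (s : List (String × Int) × PySem.Set String) (a : String),
      (if enemy ∈ conspD.getD a [] then
        (s.1 ++ [(a, pvDistOf distances idxD a)], PySem.Set.add s.2 a)
      else s) =
      ((if enemy ∈ conspD.getD a [] then s.1 ++ [(a, pvDistOf distances idxD a)] else s.1),
       (if enemy ∈ conspD.getD a [] then PySem.Set.add s.2 a else s.2)) := by
    intro s a; split_ifs <;> rfl
  have h1 : close_allies.foldl (fun s a =>
      if enemy ∈ conspD.getD a [] then
        (s.1 ++ [(a, pvDistOf distances idxD a)], PySem.Set.add s.2 a)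
      else s) (([], PySem.Set.empty) : List (String × Int) × PySem.Set String) =
      (close_allies.foldl (fun q a =>
        if enemy ∈ conspD.getD a [] then q ++ [(a, pvDistOf distances idxD a)] else q) [],
       close_allies.foldl (fun v a =>
        if enemy ∈ conspD.getD a [] then PySem.Set.add v a else v) PySem.Set.empty) := by
    rw [show (fun (s : List (String × Int) × PySem.Set String) a =>
      if enemy ∈ conspD.getD a [] then
        (s.1 ++ [(a, pvDistOf distances idxD a)], PySem.Set.add s.2 a)
      else s) = (fun s a =>
        ((if enemy ∈ conspD.getD a [] then s.1 ++ [(a, pvDistOf distances idxD a)] else s.1),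
         (if enemy ∈ conspD.getD a [] then PySem.Set.add s.2 a else s.2)))
      from funext fun s => funext fun a => hstep s a]
    exact PySem.List.foldl_prod_mk
      (fun q a => if enemy ∈ conspD.getD a [] then q ++ [(a, pvDistOf distances idxD a)] else q)
      (fun v a => if enemy ∈ conspD.getD a [] then PySem.Set.add v a else v)
      close_allies [] PySem.Set.empty
  rw [h1]
  congr 1
  rw [PySem.List.foldl_append_ite (p := fun a => enemy ∈ conspD.getD a [])
      (f := fun a => (a, pvDistOf distances idxD a))]
  simp

-- the key fact: B's dict, looked up at e, is A's per-enemy BFS result (decorated with its distance)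
theorem best_get? (enemies : List String) (conspD : PySem.Dict String (List String))
    (close_allies : List String) (distances : List (List Int)) (idxD : PySem.Dict String Int)
    (e : String) :
    (close_allies.foldl
        (pvAllyStep conspD (PySem.Set.ofList enemies) (conspD.getD "Cersei Lannister" []) distances idxD)
        PySem.Dict.empty).get? e =
      if e ∈ enemies then
        (pvBfs e conspD close_allies distances idxD).map (fun b => (b, pvDistOf distances idxD b))
      else none := by
  rw [foldl_pvAllyStep_get?, PySem.Dict.get?_empty]
  by_cases he : e ∈ enemies
  · rw [if_pos he]
    have hfil : close_allies.filter (fun a => e ∈ pvTs conspD (PySem.Set.ofList enemies) a) =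
        close_allies.filter (fun a => e ∈ conspD.getD a []) := by
      apply List.filter_congr
      intro a _
      simp [mem_pvTs, he]
    rw [hfil, pvBfs_eq]
    have := foldl_pvStepB_map (conspD.getD "Cersei Lannister" []) distances idxD
      ((close_allies.filter (fun a => e ∈ conspD.getD a [])).map
        (fun a => (a, pvDistOf distances idxD a)))
      (by intro p hp; simp only [List.mem_map] at hp; rcases hp with ⟨a, _, rfl⟩; rfl) none
    simpa using this
  · rw [if_neg he]
    have hfil : close_allies.filter (fun a => e ∈ pvTs conspD (PySem.Set.ofList enemies) a) = [] := by
      apply List.filter_eq_nil_iff.mpr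
      intro a _
      simp [mem_pvTs, he]
    rw [hfil]
    rfl

theorem pvUpd_keys_nodup (cG : List String) (a : String) (dist : Int)
    (d : PySem.Dict String (String × Int)) (t : String) (h : d.keys.Nodup) :
    (pvUpd cG a dist d t).keys.Nodup := by
  unfold pvUpd
  rcases hg : d.get? t with _ | ⟨b, bd⟩ <;> simp only [hg]
  · exact PySem.Dict.nodup_keys_insert _ _ _ h
  · split_ifs
    · exact PySem.Dict.nodup_keys_insert _ _ _ h
    · exact h

theorem keys_nodup_best (conspD : PySem.Dict String (List String)) (enemySet : PySem.Set String)
    (cG : List String) (distances : List (List Int)) (idxD : PySem.Dict String Int)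
    (L : List String) (d : PySem.Dict String (String × Int)) (h : d.keys.Nodup) :
    (L.foldl (pvAllyStep conspD enemySet cG distances idxD) d).keys.Nodup := by
  induction L generalizing d with
  | nil => exact h
  | cons a L ih =>
    refine ih _ ?_
    simp only [pvAllyStep]
    split_ifs with h0
    · exact h
    · clear h0
      generalize pvTs conspD enemySet a = ts
      induction ts generalizing d with
      | nil => exact h
      | cons t ts ih2 => exact ih2 _ (pvUpd_keys_nodup _ _ _ _ _ h)

theorem pvA_fold (enemies : List String) (conspD : PySem.Dict String (List String))
    (close_allies : List String) (distances : List (List Int)) (idxD : PySem.Dict String Int) :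
    (enemies.foldl (fun s e =>
      match pvBfs e conspD close_allies distances idxD with
      | some b => if b ≠ "" then (s.1 ++ [[b, e]], s.2) else (s.1, PySem.Set.add s.2 e)
      | none => (s.1, PySem.Set.add s.2 e))
      (([], PySem.Set.empty) : List (List String) × PySem.Set String)) =
    ((enemies.filter (fun e => decide ((pvBfs e conspD close_allies distances idxD).getD "" ≠ ""))).map
        (fun e => [(pvBfs e conspD close_allies distances idxD).getD "", e]),
     PySem.Set.ofList (enemies.filter
        (fun e => decide ((pvBfs e conspD close_allies distances idxD).getD "" = "")))) := by
  have hstep : (fun (s : List (List String) × PySem.Set String) e =>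
      match pvBfs e conspD close_allies distances idxD with
      | some b => if b ≠ "" then (s.1 ++ [[b, e]], s.2) else (s.1, PySem.Set.add s.2 e)
      | none => (s.1, PySem.Set.add s.2 e)) =
      (fun s e =>
        ((if (pvBfs e conspD close_allies distances idxD).getD "" ≠ "" then
            s.1 ++ [[(pvBfs e conspD close_allies distances idxD).getD "", e]] else s.1),
         (if (pvBfs e conspD close_allies distances idxD).getD "" = "" then
            PySem.Set.add s.2 e else s.2))) := by
    funext s e
    rcases hb : pvBfs e conspD close_allies distances idxD with _ | b <;> simp only [hb]
    · simp
    · by_cases hb2 : b = "" <;> simp [hb2]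
  rw [hstep]
  rw [PySem.List.foldl_prod_mk
      (f := fun dc e => if (pvBfs e conspD close_allies distances idxD).getD "" ≠ "" then
          dc ++ [[(pvBfs e conspD close_allies distances idxD).getD "", e]] else dc)
      (g := fun v e => if (pvBfs e conspD close_allies distances idxD).getD "" = "" then
          PySem.Set.add v e else v)]
  refine Prod.ext ?_ ?_
  · rw [PySem.List.foldl_append_ite
        (p := fun e => (pvBfs e conspD close_allies distances idxD).getD "" ≠ "")
        (f := fun e => [(pvBfs e conspD close_allies distances idxD).getD "", e])]
    simp
  · rw [PySem.List.foldl_ite_eq_foldl_filter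
        (p := fun e => (pvBfs e conspD close_allies distances idxD).getD "" = "")
        (f := PySem.Set.add)]
    rw [PySem.Set.ofList_eq_foldl]
    rfl

theorem pvDirect_perm (enemies : List String) (conspD : PySem.Dict String (List String))
    (close_allies : List String) (distances : List (List Int)) (idxD : PySem.Dict String Int)
    (hnd : enemies.Nodup) :
    ((enemies.filter (fun e => decide ((pvBfs e conspD close_allies distances idxD).getD "" ≠ ""))).map
        (fun e => [(pvBfs e conspD close_allies distances idxD).getD "", e])).Perm
      (((close_allies.foldl
          (pvAllyStep conspD (PySem.Set.ofList enemies) (conspD.getD "Cersei Lannister" []) distances idxD)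
          PySem.Dict.empty).items.filter (fun p => p.2.1 ≠ "")).map (fun p => [p.2.1, p.1])) := by
  set bestD := close_allies.foldl
      (pvAllyStep conspD (PySem.Set.ofList enemies) (conspD.getD "Cersei Lannister" []) distances idxD)
      PySem.Dict.empty with hbest
  have hkeys : bestD.keys.Nodup := keys_nodup_best _ _ _ _ _ _ _ (by simp [PySem.Dict.keys, PySem.Dict.empty])
  have hitems : bestD.items.Nodup := by
    have : (bestD.items.map (fun p => p.1)).Nodup := hkeys
    exact this.of_map
  apply (List.perm_ext_iff_of_nodup ?_ ?_).mpr
  · -- membership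
    intro x
    constructor
    · intro hx
      rcases List.mem_map.mp hx with ⟨e, he, rfl⟩
      rcases List.mem_filter.mp he with ⟨he1, he2⟩
      rcases hb : pvBfs e conspD close_allies distances idxD with _ | b
      · rw [hb] at he2; simp at he2
      · rw [hb] at he2
        simp only [Option.getD_some] at he2
        simp only [Option.getD_some]
        apply List.mem_map.mpr
        refine ⟨(e, (b, pvDistOf distances idxD b)), ?_, rfl⟩
        apply List.mem_filter.mpr
        refine ⟨?_, by simpa using he2⟩
        apply (PySem.Dict.get?_eq_some_iff_mem_items _ _ _ hkeys).mp
        rw [best_get?, if_pos he1, hb]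
        rfl
    · intro hx
      rcases List.mem_map.mp hx with ⟨p, hp, rfl⟩
      rcases List.mem_filter.mp hp with ⟨hp1, hp2⟩
      have hg := (PySem.Dict.get?_eq_some_iff_mem_items _ _ _ hkeys).mpr hp1
      rw [best_get?] at hg
      by_cases he : p.1 ∈ enemies
      · rw [if_pos he] at hg
        rcases hb : pvBfs p.1 conspD close_allies distances idxD with _ | b
        · rw [hb] at hg; simp at hg
        · rw [hb] at hg
          simp only [Option.map_some, Option.some_inj] at hg
          apply List.mem_map.mpr
          refine ⟨p.1, List.mem_filter.mpr ⟨he, ?_⟩, ?_⟩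
          · rw [hb]; simpa [← hg] using hp2
          · rw [hb, ← hg]; simp
      · rw [if_neg he] at hg; exact absurd hg (by simp)
  · -- Nodup LA
    refine List.Nodup.map_on ?_ (hnd.filter _)
    intro e he e' he' hx
    simp only [List.cons.injEq] at hx
    exact hx.2.1
  · -- Nodup LB
    refine List.Nodup.map_on ?_ (hitems.filter _)
    intro p hp p' hp' hx
    simp only [List.cons.injEq, and_true] at hx
    obtain ⟨h21, h1⟩ := hx
    have g1 := (PySem.Dict.get?_eq_some_iff_mem_items _ _ _ hkeys).mpr (List.mem_filter.mp hp).1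
    have g2 := (PySem.Dict.get?_eq_some_iff_mem_items _ _ _ hkeys).mpr (List.mem_filter.mp hp').1
    rw [h1] at g1
    exact Prod.ext h1 (Option.some.inj (g1.symm.trans g2))

-- ===== VERDICT (by name: the statement is the Claim_ definition above) =====
theorem eliminate_enemies_with_close_allies_spec : Claim_equal_eliminate_enemies_with_close_allies := by
  intro enemies conspiracies close_allies distances index_map _ hpre
  unfold Spec_eliminate_enemies_with_close_allies
  simp only [eliminate_enemies_with_close_allies, eliminate_enemies_with_close_allies_alt]
  rw [pvA_fold]
  refine Prod.ext ?_ ?_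
  · dsimp only
    rw [show (List.decidableLT : DecidableLT (List String)) = LinearOrder.toDecidableLT from
      funext fun a => funext fun b => Subsingleton.elim _ _]
    exact PySem.List.sorted_eq_sorted_of_perm _ _ (fun x => x) (fun a b h => h)
      (pvDirect_perm enemies (PySem.Dict.ofList conspiracies) close_allies distances
        (PySem.Dict.ofList index_map) hpre.1)
  · dsimp only
    show PySem.Set.ofList _ = PySem.Set.ofList _
    congr 1
    apply List.filter_congr
    intro e he
    rw [best_get?, if_pos he]
    rcases hb : pvBfs e (PySem.Dict.ofList conspiracies) close_allies distances
        (PySem.Dict.ofList index_map) with _ | b <;> simp
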